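-- pv_equiv track=rewrite | github.com/KimDaeUng/py_algo | 개인문제/Programmers_Basic/124-나라의-숫자.py | solution
-- ===== SOURCE A (Python) =====
-- def solution(n):
--
--     trans = "412"
--     answer = ''
--
--     q = None
--     while q != 0:
--         q, r = divmod(n, 3)
--         answer += trans[r]
--         if r == 0:
--             q -= 1
--         n = q
--     return answer[::-1]
-- ===== SOURCE B (Python) =====
-- def solution(n):
--     if n <= 3:
--         return "124"[n - 1]
--     return solution((n - 1) // 3) + "124"[(n - 1) % 3]
-- ===== Notes on version B (the rewrite author's own statement) =====
-- stated objective: simpler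
-- what changed: Replaces A's accumulate-and-reverse while-loop over divmod(n,3) with the '412' table and a quotient-adjustment branch by a short bijective-base-3 recursion on (n-1): digit (n-1)%3 indexes the '124' table directly, the quotient is (n-1)//3 with no adjustment, and digits are emitted most-significant-first by the recursion, so there is no accumulator, no reversal and no special-case branch.
-- outside the precondition, e.g. on solution(0): A does not finish within the time limit, B returns '4'
import Mathlib
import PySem

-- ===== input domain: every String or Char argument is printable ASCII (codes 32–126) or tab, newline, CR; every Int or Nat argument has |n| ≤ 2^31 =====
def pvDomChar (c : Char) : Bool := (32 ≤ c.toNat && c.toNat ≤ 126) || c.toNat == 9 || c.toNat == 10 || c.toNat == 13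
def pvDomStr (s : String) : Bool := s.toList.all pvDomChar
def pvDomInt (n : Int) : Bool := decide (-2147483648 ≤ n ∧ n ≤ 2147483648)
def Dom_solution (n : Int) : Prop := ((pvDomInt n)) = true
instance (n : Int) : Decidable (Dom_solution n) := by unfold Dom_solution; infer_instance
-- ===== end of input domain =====

-- B replaces A's accumulate-then-reverse while-loop (divmod, '412' table, quotient adjustment)
-- by a bijective-base-3 recursion on (n-1) with the '124' table (objective: simpler).

-- ===== PORT A =====
-- A's while-loop: the first test 'q != 0' compares None and is always true, so the loop is a
-- do-while; ported with fuel n.toNat + 1, which suffices for every n admitted by Pre_solution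
-- (the quotient strictly decreases). The string 'answer' is carried as its List Char;
-- 'answer[::-1]' is the list reversal.
def solutionLoopA (fuel : Nat) (n : Int) (answer : List Char) : List Char :=
  match fuel with
  | 0 => answer
  | fuel + 1 =>
    let q := PySem.Int.floordiv n 3
    let r := PySem.Int.mod n 3
    let answer := answer ++ [PySem.List.pyGetD ['4', '1', '2'] r ' ']
    let q := if r = 0 then q - 1 else q
    if q = 0 then answer else solutionLoopA fuel q answer

def solution (n : Int) : String :=
  String.ofList (solutionLoopA (n.toNat + 1) n []).reverse

-- ===== PORT B =====
-- Source B's recursion, with the same fuel bound making it structural.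
def solutionRecB (fuel : Nat) (n : Int) : List Char :=
  match fuel with
  | 0 => []
  | fuel + 1 =>
    if n ≤ 3 then
      [PySem.List.pyGetD ['1', '2', '4'] (n - 1) ' ']
    else
      solutionRecB fuel (PySem.Int.floordiv (n - 1) 3)
        ++ [PySem.List.pyGetD ['1', '2', '4'] (PySem.Int.mod (n - 1) 3) ' ']

def solution_alt (n : Int) : String :=
  String.ofList (solutionRecB (n.toNat + 1) n)

-- ===== PRECONDITION & SPEC =====
-- Pre_ excludes n ≤ 0, on which A's while-loop never terminates (the quotient stays negative).
def Pre_solution (n : Int) : Prop := 1 ≤ n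
instance (n : Int) : Decidable (Pre_solution n) := by unfold Pre_solution; infer_instance
def pvWitness_solution : Int := 7

def Spec_solution (n : Int) (out : String) : Prop := out = solution_alt n
instance (n : Int) (out : String) : Decidable (Spec_solution n out) := by unfold Spec_solution; infer_instance

-- ===== CLAIM (what is proved, stated in full; the proofs are below) =====
def Claim_equal_solution : Prop := ∀ (n : Int), Dom_solution n → Pre_solution n → Spec_solution n (solution n)

-- ===== LEMMAS AND PROOFS =====

-- A's adjusted quotient is B's bijective quotient (n-1)//3
lemma quot_eq (n : Int) :
    (if PySem.Int.mod n 3 = 0 then PySem.Int.floordiv n 3 - 1 else PySem.Int.floordiv n 3)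
      = PySem.Int.floordiv (n - 1) 3 := by
  have h3 : (0:Int) < 3 := by omega
  rw [PySem.Int.floordiv_eq_ediv_of_pos h3, PySem.Int.floordiv_eq_ediv_of_pos h3,
      PySem.Int.mod_eq_emod_of_pos h3]
  split_ifs with h <;> omega

-- A's '412'[n % 3] is B's '124'[(n-1) % 3]
lemma char_eq (n : Int) (hn : 1 ≤ n) :
    PySem.List.pyGetD ['4', '1', '2'] (PySem.Int.mod n 3) ' '
      = PySem.List.pyGetD ['1', '2', '4'] (PySem.Int.mod (n - 1) 3) ' ' := by
  have h3 : (0:Int) < 3 := by omega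
  rw [PySem.Int.mod_eq_emod_of_pos h3, PySem.Int.mod_eq_emod_of_pos h3]
  have h : n % 3 = 0 ∨ n % 3 = 1 ∨ n % 3 = 2 := by omega
  rcases h with h | h | h
  · have h' : (n - 1) % 3 = 2 := by omega
    rw [h, h']; decide
  · have h' : (n - 1) % 3 = 0 := by omega
    rw [h, h']; decide
  · have h' : (n - 1) % 3 = 1 := by omega
    rw [h, h']; decide

-- bounds for B's step quotient
lemma bquot_bounds (n : Int) (hn : 4 ≤ n) :
    1 ≤ PySem.Int.floordiv (n - 1) 3 ∧ PySem.Int.floordiv (n - 1) 3 < n := by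
  rw [PySem.Int.floordiv_eq_ediv_of_pos (by omega : (0:Int) < 3)]
  omega

-- loop ↔ recursion: with enough fuel, A's loop appends the reverse of B's recursion result
lemma loop_eq (fuelA : Nat) : ∀ (fuelB : Nat) (n : Int) (answer : List Char),
    1 ≤ n → n.toNat < fuelA → n.toNat < fuelB →
    solutionLoopA fuelA n answer = answer ++ (solutionRecB fuelB n).reverse := by
  induction fuelA with
  | zero => intro _ n _ hn hA _; omega
  | succ f ih =>
    intro fuelB n answer hn hA hB
    match fuelB with
    | 0 => omega
    | fB + 1 =>
      simp only [solutionLoopA, solutionRecB]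
      rw [quot_eq n, char_eq n hn]
      by_cases h : n ≤ 3
      · -- base: B's index n-1 equals (n-1) % 3 here, and the adjusted quotient is 0
        have hq : (n - 1) / 3 = 0 := by omega
        have hm : PySem.Int.mod (n - 1) 3 = n - 1 := by
          rw [PySem.Int.mod_eq_emod_of_pos (by omega : (0:Int) < 3)]; omega
        rw [hm]
        simp [h, hq]
      · obtain ⟨hq1, hqlt⟩ := bquot_bounds n (by omega)
        have hq : PySem.Int.floordiv (n - 1) 3 ≠ 0 := by omega
        simp only [h, if_false, hq, if_false]
        rw [ih fB (PySem.Int.floordiv (n - 1) 3) _ hq1 (by omega) (by omega)]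
        simp

-- ===== VERDICT (by name: the statement is the Claim_ definition above) =====
theorem solution_spec : Claim_equal_solution := by
  intro n _ hn
  unfold Spec_solution solution solution_alt
  rw [loop_eq (n.toNat + 1) (n.toNat + 1) n [] hn (by omega) (by omega)]
  simp
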